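-- pv_equiv track=rewrite | github.com/burning23185/baekjoon | 백준/Silver/11047. 동전 0/동전 0.py | findMaxAvailableNum
-- ===== SOURCE A (Python) =====
-- def findMaxAvailableNum(nums , k):
--     left, right = 0 , len(nums) -1
--
--     while left <= right:
--         mid = (left + right)//2
--
--         if nums[mid] <= k:
--             left = mid +1
--
--         else:
--             right = mid -1
--
--     return right
-- ===== SOURCE B (Python) =====
-- def findMaxAvailableNum(nums, k):
--     # recursion on (base, size): the window is nums[base : base+n]; returns base-1 when empty
--     def go(base, n):
--         if n == 0:
--             return base - 1
--         h = (n - 1) // 2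
--         if nums[base + h] <= k:
--             return go(base + h + 1, n - 1 - h)
--         return go(base, h)
--     return go(0, len(nums))
-- ===== Notes on version B (the rewrite author's own statement) =====
-- stated objective: alternative
-- what changed: The iterative while-loop over mutable (left, right) bounds is re-decomposed as a recursion over (base, size) of the current window: the size is a natural number that strictly shrinks, the right bound never appears, and probe positions are computed as base + (n-1)//2; the comparison sequence is identical.
import Mathlib
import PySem

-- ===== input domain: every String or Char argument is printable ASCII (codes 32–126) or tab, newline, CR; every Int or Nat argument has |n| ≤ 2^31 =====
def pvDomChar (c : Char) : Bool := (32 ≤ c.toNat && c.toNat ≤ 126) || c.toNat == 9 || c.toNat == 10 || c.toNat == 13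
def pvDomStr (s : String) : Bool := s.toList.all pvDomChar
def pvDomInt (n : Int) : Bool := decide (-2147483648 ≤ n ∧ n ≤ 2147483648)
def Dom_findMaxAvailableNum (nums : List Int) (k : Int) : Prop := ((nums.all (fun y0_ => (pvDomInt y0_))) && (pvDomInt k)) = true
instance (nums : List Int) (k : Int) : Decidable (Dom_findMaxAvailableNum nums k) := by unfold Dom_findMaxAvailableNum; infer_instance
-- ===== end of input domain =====

-- B replaces A's two mutable int bounds (left, right) with a recursion over (base, size):
-- the window size is a natural number that strictly shrinks; same comparison sequence, different state.
-- ===== PORT A =====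
-- the while-loop of A: state (left, right), terminates since right - left shrinks
def findMaxAvailableNumLoop (nums : List Int) (k : Int) (left right : Int) : Int :=
  if h : left ≤ right then
    let mid := PySem.Int.floordiv (left + right) 2
    -- nums[mid]: in A's reachable states mid is always a valid index, so the IndexError branch is unreachable
    if (PySem.List.pyGet? nums mid).getD 0 ≤ k then
      findMaxAvailableNumLoop nums k (mid + 1) right
    else
      findMaxAvailableNumLoop nums k left (mid - 1)
  else
    right
termination_by (right + 1 - left).toNat
decreasing_by
  · have := PySem.Int.floordiv_two_mid_bounds h; omega
  · have := PySem.Int.floordiv_two_mid_bounds h; omega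

def findMaxAvailableNum (nums : List Int) (k : Int) : Int :=
  findMaxAvailableNumLoop nums k 0 ((nums.length : Int) - 1)

-- ===== PORT B =====
-- B's go(base, n): the window nums[base : base+n]; probes base + (n-1)//2, returns base-1 when empty
def findMaxAvailableNumGo (nums : List Int) (k : Int) (base : Int) (n : Nat) : Int :=
  if n = 0 then base - 1
  else
    let h := (n - 1) / 2
    if (PySem.List.pyGet? nums (base + (h : Int))).getD 0 ≤ k then
      findMaxAvailableNumGo nums k (base + (h : Int) + 1) (n - 1 - h)
    else
      findMaxAvailableNumGo nums k base h
termination_by n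
decreasing_by all_goals omega

def findMaxAvailableNum_alt (nums : List Int) (k : Int) : Int :=
  findMaxAvailableNumGo nums k 0 nums.length

-- ===== PRECONDITION & SPEC =====
def Spec_findMaxAvailableNum (nums : List Int) (k : Int) (out : Int) : Prop := out = findMaxAvailableNum_alt nums k
instance (nums : List Int) (k : Int) (out : Int) : Decidable (Spec_findMaxAvailableNum nums k out) := by unfold Spec_findMaxAvailableNum; infer_instance

-- ===== CLAIM (what is proved, stated in full; the proofs are below) =====
def Claim_equal_findMaxAvailableNum : Prop := ∀ (nums : List Int) (k : Int), Dom_findMaxAvailableNum nums k → Spec_findMaxAvailableNum nums k (findMaxAvailableNum nums k)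

-- ===== LEMMAS AND PROOFS =====
theorem go_eq_loop (nums : List Int) (k : Int) (base : Int) (n : Nat) :
    findMaxAvailableNumGo nums k base n = findMaxAvailableNumLoop nums k base (base + (n : Int) - 1) := by
  fun_induction findMaxAvailableNumGo nums k base n with
  | case1 =>
    rename_i base
    rw [findMaxAvailableNumLoop, dif_neg (by omega)]
    omega
  | case2 =>
    rename_i base n hn h hle ih
    have hh : h = (n - 1) / 2 := rfl
    rw [findMaxAvailableNumLoop]
    have hle' : base ≤ base + (n : Int) - 1 := by omega
    rw [dif_pos hle']
    have hmid : PySem.Int.floordiv (base + (base + (n : Int) - 1)) 2 = base + (h : Int) := by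
      rw [PySem.Int.floordiv_eq_ediv_of_pos (by omega)]; omega
    rw [hmid, if_pos hle, ih]
    congr 1; omega
  | case3 =>
    rename_i base n hn h hle ih
    have hh : h = (n - 1) / 2 := rfl
    rw [findMaxAvailableNumLoop]
    have hle' : base ≤ base + (n : Int) - 1 := by omega
    rw [dif_pos hle']
    have hmid : PySem.Int.floordiv (base + (base + (n : Int) - 1)) 2 = base + (h : Int) := by
      rw [PySem.Int.floordiv_eq_ediv_of_pos (by omega)]; omega
    rw [hmid, if_neg hle, ih]

-- ===== VERDICT (by name: the statement is the Claim_ definition above) =====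
theorem findMaxAvailableNum_spec : Claim_equal_findMaxAvailableNum := by
  intro nums k _
  unfold Spec_findMaxAvailableNum findMaxAvailableNum findMaxAvailableNum_alt
  rw [go_eq_loop]
  congr 1; omega
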